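-- pv_equiv track=rewrite | github.com/PirvuDanielCatalin/Faculty_Playgroung | Python/Operations-on-rare-matrices/RareMatrices_EN.py | restructMatrix
-- ===== SOURCE A (Python) =====
-- def restructMatrix(Mat):
--     reMat = []  # Transposed matrix
--     for lista in Mat:  # For each line - vector of tuples
--         for element in lista:  # For each tuple
--             column = element[2]  # We take the column value from tuple
--             # We take the curent length of the matrix = number of columns so far
--             # len([]) = 0
--             l = len(reMat)
--
--             # We search in the transposed matrix reMat for the corresponding column type list,
--             # I mean the list that has only tuples that have the third component equal to the previous column variable
--             i = 0
--             ok = 0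
--             while i < l:
--                 ok = 1
--                 if reMat[i][0][2] == column:
--                     # If we find a column type list which satisfy the condition above, we stop,
--                     # this way when we get out of while, i will be the index in the transposed matrix reMat
--                     # of the column type list in which the new element will be inserted
--                     break
--                 else:
--                     # If not, we go further until we check all of the column type lists existing up to the current step in reMat
--                     i += 1
--
--             # If i = 0, means that we didn't pass the while condition and this could happend only for the first tuple read from Mat
--             # If i = l, means that the while ended and no column type list was found coresponding for the third component of the tuple
--             if ok == 0 or i == l:  # It doesn't exist in reMat a column type list coresponding to column variable
--                 temp = []  # We make a new column type list
--                 # The tuple is inserted in this new list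
--                 temp.append(element)
--                 # The entire list isinserted in the transposed matrix reMat
--                 reMat.append(temp)
--             else:
--                 # If i is somewhere in the middle, the tuple is inserted in the list from the index given by i in reMat
--                 reMat[i].append(element)
--
--     reMat = sorted(reMat, key=lambda x: x[0][2])
--     # We sort the list of column type lists by column
--     # I mean we take the first element from each list and we look at his third component
--     return reMat
-- ===== SOURCE B (Python) =====
-- def restructMatrix(Mat):
--     # Flatten all tuples, stably sort them by column, then split into runs of
--     # equal column in one linear pass.
--     flat = [e for row in Mat for e in row]
--     flat.sort(key=lambda e: e[2])
--     out = []
--     cur = []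
--     for e in flat:
--         if cur and cur[0][2] != e[2]:
--             out.append(cur)
--             cur = []
--         cur.append(e)
--     if cur:
--         out.append(cur)
--     return out
-- ===== Notes on version B (the rewrite author's own statement) =====
-- stated objective: alternative
-- what changed: Instead of A's incremental grouping (per-element linear scan over the growing group list, then sorting whole groups by their head's column), B flattens all tuples, stably sorts the flat list by column once, and splits it into runs of equal column in one linear pass.
import Mathlib
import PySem

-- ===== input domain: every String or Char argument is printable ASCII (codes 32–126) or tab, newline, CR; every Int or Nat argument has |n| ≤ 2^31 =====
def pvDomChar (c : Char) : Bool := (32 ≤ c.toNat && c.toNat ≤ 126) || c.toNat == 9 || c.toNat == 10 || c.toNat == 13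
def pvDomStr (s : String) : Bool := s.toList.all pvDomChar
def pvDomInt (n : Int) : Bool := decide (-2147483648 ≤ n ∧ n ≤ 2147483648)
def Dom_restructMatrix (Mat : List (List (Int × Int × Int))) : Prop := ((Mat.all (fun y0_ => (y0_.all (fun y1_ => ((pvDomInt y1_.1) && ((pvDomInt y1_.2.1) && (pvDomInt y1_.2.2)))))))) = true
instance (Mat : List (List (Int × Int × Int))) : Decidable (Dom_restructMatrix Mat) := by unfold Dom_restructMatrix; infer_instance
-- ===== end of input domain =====

-- B flattens all tuples, stably sorts the flat list by column, and splits it into runs of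
-- equal column in one linear pass, instead of A's incremental grouping with a per-element
-- scan over the growing group list followed by sorting whole groups (objective: alternative).

-- ===== PORT A =====

-- reMat[i][0][2]: the column of a group's head.  In A every group is nonempty, so the
-- IndexError branch of pyGet? is unreachable; getD supplies an arbitrary default there.
def pvHeadKey (g : List (Int × Int × Int)) : Int := ((PySem.List.pyGet? g 0).getD (0, 0, 0)).2.2

-- the 'while i < l' search loop: walks the (suffix of the) group list with index i and flag ok
def pvScan (gs : List (List (Int × Int × Int))) (column : Int) (i : Nat) (ok : Nat) : Nat × Nat :=
  match gs with
  | [] => (i, ok)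
  | g :: rest =>
      -- ok = 1; if reMat[i][0][2] == column: break else: i += 1
      if pvHeadKey g == column then (i, 1) else pvScan rest column (i + 1) 1

-- reMat[i].append(element)
def pvAppendAt (gs : List (List (Int × Int × Int))) (i : Nat) (e : Int × Int × Int) :
    List (List (Int × Int × Int)) :=
  match gs, i with
  | [], _ => []
  | g :: rest, 0 => (g ++ [e]) :: rest
  | g :: rest, Nat.succ j => g :: pvAppendAt rest j e

-- the body of A's inner 'for element in lista' loop
def pvAddElem (reMat : List (List (Int × Int × Int))) (element : Int × Int × Int) :
    List (List (Int × Int × Int)) :=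
  let column := element.2.2
  let l := reMat.length
  let r := pvScan reMat column 0 0
  if r.2 = 0 ∨ r.1 = l then reMat ++ [[element]]   -- temp = [element]; reMat.append(temp)
  else pvAppendAt reMat r.1 element                -- reMat[i].append(element)

def restructMatrix (Mat : List (List (Int × Int × Int))) : List (List (Int × Int × Int)) :=
  let reMat := Mat.foldl (fun reMat lista => lista.foldl pvAddElem reMat) []
  PySem.List.sorted reMat pvHeadKey false          -- sorted(reMat, key=lambda x: x[0][2])

-- ===== PORT B =====

-- the body of B's run-splitting loop, state = (out, cur):
-- if cur and cur[0][2] != e[2]: out.append(cur); cur = []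
-- cur.append(e)
def pvRunStep (st : List (List (Int × Int × Int)) × List (Int × Int × Int))
    (e : Int × Int × Int) : List (List (Int × Int × Int)) × List (Int × Int × Int) :=
  let st := if st.2 ≠ [] ∧ pvHeadKey st.2 ≠ e.2.2 then (st.1 ++ [st.2], ([] : List (Int × Int × Int))) else st
  (st.1, st.2 ++ [e])

def restructMatrix_alt (Mat : List (List (Int × Int × Int))) : List (List (Int × Int × Int)) :=
  -- flat = [e for row in Mat for e in row]
  let flat := Mat.foldl (fun acc row => row.foldl (fun acc e => acc ++ [e]) acc) []
  -- flat.sort(key=lambda e: e[2])  (stable)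
  let flat := PySem.List.sorted flat (fun e => e.2.2) false
  -- the run-splitting pass
  let st := flat.foldl pvRunStep ([], [])
  -- if cur: out.append(cur)
  if st.2 ≠ [] then st.1 ++ [st.2] else st.1

-- ===== PRECONDITION & SPEC =====
def Spec_restructMatrix (Mat : List (List (Int × Int × Int))) (out : List (List (Int × Int × Int))) : Prop := out = restructMatrix_alt Mat
instance (Mat : List (List (Int × Int × Int))) (out : List (List (Int × Int × Int))) : Decidable (Spec_restructMatrix Mat out) := by unfold Spec_restructMatrix; infer_instance

-- ===== CLAIM (what is proved, stated in full; the proofs are below) =====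
def Claim_equal_restructMatrix : Prop := ∀ (Mat : List (List (Int × Int × Int))), Dom_restructMatrix Mat → Spec_restructMatrix Mat (restructMatrix Mat)

-- ===== LEMMAS AND PROOFS =====

-- the canonical grouping: distinct columns in first-occurrence order, each mapped to its filter
def pvKeys (es : List (Int × Int × Int)) : List Int := PySem.List.dedup (es.map (fun e => e.2.2))

def pvGroup (es : List (Int × Int × Int)) (k : Int) : List (Int × Int × Int) :=
  es.filter (fun e => e.2.2 == k)

def pvCanon (es : List (Int × Int × Int)) : List (List (Int × Int × Int)) :=
  (pvKeys es).map (pvGroup es)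

-- the sorted distinct keys
def pvSK (es : List (Int × Int × Int)) : List Int :=
  PySem.List.sorted (pvKeys es) (fun k => k) false

theorem pvGroup_ne_nil (es : List (Int × Int × Int)) (k : Int) (hk : k ∈ pvKeys es) :
    pvGroup es k ≠ [] := by
  have hmem : k ∈ es.map (fun e => e.2.2) := by
    simpa [pvKeys, PySem.List.mem_dedup] using hk
  obtain ⟨e, he, hke⟩ := List.mem_map.mp hmem
  simp only [pvGroup, ne_eq, List.filter_eq_nil_iff, not_forall]
  exact ⟨e, he, by simp [hke]⟩

theorem pvHeadKey_group (es : List (Int × Int × Int)) (k : Int) (hk : k ∈ pvKeys es) :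
    pvHeadKey (pvGroup es k) = k := by
  have hne := pvGroup_ne_nil es k hk
  rcases hg : pvGroup es k with _ | ⟨h, t⟩
  · exact absurd hg hne
  · have hh : h ∈ pvGroup es k := by rw [hg]; exact List.mem_cons_self
    have := (List.mem_filter.mp hh).2
    simp only [beq_iff_eq] at this
    simp [pvHeadKey, PySem.List.pyGet?, PySem.List.pyIdx?, this]

-- the while loop when no group head matches: i walks to the end
theorem pvScan_no_match (gs : List (List (Int × Int × Int))) (c : Int)
    (h : ∀ g ∈ gs, pvHeadKey g ≠ c) : ∀ i ok, (pvScan gs c i ok).1 = i + gs.length := by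
  induction gs with
  | nil => intro i ok; simp [pvScan]
  | cons g rest ih =>
      intro i ok
      have hg : pvHeadKey g ≠ c := h g List.mem_cons_self
      rw [pvScan]
      simp only [beq_iff_eq, if_neg hg]
      rw [ih (fun g hg => h g (List.mem_cons_of_mem _ hg)) (i+1) 1]
      simp [List.length_cons]; omega

-- the while loop over groups with heads ks (c ∈ ks): stops at the first match, flag set
theorem pvScan_match (ks : List Int) (f : Int → List (Int × Int × Int)) (c : Int)
    (hhead : ∀ k ∈ ks, pvHeadKey (f k) = k) (hc : c ∈ ks) :
    (∀ i ok, pvScan (ks.map f) c i ok = (i + ks.idxOf c, 1)) ∧ ks.idxOf c < ks.length := by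
  induction ks with
  | nil => cases hc
  | cons k rest ih =>
      have hk : pvHeadKey (f k) = k := hhead k List.mem_cons_self
      by_cases hkc : k = c
      · subst hkc
        refine ⟨fun i ok => ?_, by simp [List.idxOf_cons_self]⟩
        rw [List.map_cons, pvScan]; simp [hk, List.idxOf_cons_self]
      · have hc' : c ∈ rest := by
          rcases List.mem_cons.mp hc with h | h
          · exact absurd h.symm hkc
          · exact h
        obtain ⟨haux, hlt⟩ := ih (fun k hk => hhead k (List.mem_cons_of_mem _ hk)) hc'
        refine ⟨fun i ok => ?_, ?_⟩
        · rw [List.map_cons, pvScan]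
          simp only [beq_iff_eq, hk, if_neg hkc]
          rw [haux (i+1) 1, List.idxOf_cons_ne _ (by exact hkc)]
          congr 1
          omega
        · rw [List.idxOf_cons_ne _ (by exact hkc)]
          simp [List.length_cons]
          omega

-- appending at the index of c in a nodup key list = pointwise update at key c
theorem pvAppendAt_map (ks : List Int) (f : Int → List (Int × Int × Int)) (c : Int)
    (e : Int × Int × Int) (hc : c ∈ ks) (hnd : ks.Nodup) :
    pvAppendAt (ks.map f) (ks.idxOf c) e = ks.map (fun k => if k = c then f k ++ [e] else f k) := by
  induction ks with
  | nil => cases hc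
  | cons k rest ih =>
      by_cases hkc : k = c
      · subst hkc
        rw [List.idxOf_cons_self]
        have hcr : k ∉ rest := (List.nodup_cons.mp hnd).1
        rw [List.map_cons, pvAppendAt, List.map_cons, if_pos rfl]
        congr 1
        apply List.map_congr_left
        intro x hx
        rw [if_neg (by rintro rfl; exact hcr hx)]
      · have hc' : c ∈ rest := by
          rcases List.mem_cons.mp hc with h | h
          · exact absurd h.symm hkc
          · exact h
        rw [List.idxOf_cons_ne _ (by exact hkc), List.map_cons, List.map_cons]
        show pvAppendAt _ (rest.idxOf c + 1) e = _
        rw [pvAppendAt, if_neg hkc]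
        congr 1
        exact ih hc' (List.nodup_cons.mp hnd).2

-- one element step: A's insertion on the canonical grouping of p is that of p ++ [e]
theorem pvKeys_append (p : List (Int × Int × Int)) (e : Int × Int × Int) :
    pvKeys (p ++ [e]) = if e.2.2 ∈ pvKeys p then pvKeys p else pvKeys p ++ [e.2.2] := by
  simp only [pvKeys, List.map_append, List.map_cons, List.map_nil,
    PySem.List.dedup_eq_ofList, PySem.Set.ofList_append_singleton]
  rw [PySem.Set.add_eq_ite]

theorem pvGroup_append (p : List (Int × Int × Int)) (e : Int × Int × Int) (k : Int) :
    pvGroup (p ++ [e]) k = pvGroup p k ++ if e.2.2 = k then [e] else [] := by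
  simp only [pvGroup, List.filter_append, List.filter_cons, List.filter_nil]
  by_cases h : e.2.2 = k <;> simp [h]

theorem pvGroup_eq_nil (p : List (Int × Int × Int)) (c : Int) (hc : c ∉ pvKeys p) :
    pvGroup p c = [] := by
  rw [pvGroup, List.filter_eq_nil_iff]
  intro x hx
  simp only [beq_iff_eq]
  intro h
  refine hc ?_
  simp only [pvKeys, PySem.List.dedup_eq_ofList, PySem.Set.mem_ofList, List.mem_map]
  exact ⟨x, hx, h⟩

theorem pvStep (p : List (Int × Int × Int)) (e : Int × Int × Int) :
    pvAddElem (pvCanon p) e = pvCanon (p ++ [e]) := by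
  have hnd : (pvKeys p).Nodup := by
    simp [pvKeys, PySem.List.dedup_eq_ofList, PySem.Set.nodup_ofList]
  have hkeys := pvKeys_append p e
  have hgroup := pvGroup_append p e
  by_cases hc : e.2.2 ∈ pvKeys p
  · -- existing column: the scan finds its group, the element is appended there
    obtain ⟨hscan, hlt⟩ := pvScan_match (pvKeys p) (pvGroup p) e.2.2
      (fun k hk => pvHeadKey_group p k hk) hc
    rw [pvAddElem]
    show (if _ then _ else _) = _
    rw [pvCanon, hscan 0 0]
    simp only [Nat.zero_add, List.length_map]
    rw [if_neg (by omega)]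
    rw [pvAppendAt_map _ _ _ _ hc hnd, pvCanon, hkeys, if_pos hc]
    apply List.map_congr_left
    intro k hk
    rw [hgroup k]
    by_cases h : k = e.2.2 <;> simp [h, eq_comm]
  · -- new column: the scan runs off the end, a fresh singleton group is appended
    have hno : ∀ g ∈ pvCanon p, pvHeadKey g ≠ e.2.2 := by
      intro g hg
      obtain ⟨k, hk, rfl⟩ := List.mem_map.mp hg
      rw [pvHeadKey_group p k hk]
      exact fun h => hc (h ▸ hk)
    rw [pvAddElem]
    show (if _ then _ else _) = _
    rw [if_pos (Or.inr (by rw [pvScan_no_match _ _ hno 0 0]; simp))]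
    simp only [pvCanon]
    rw [hkeys, if_neg hc, List.map_append, List.map_cons, List.map_nil]
    congr 1
    · apply List.map_congr_left
      intro k hk
      rw [hgroup k, if_neg (by rintro rfl; exact hc hk), List.append_nil]
    · rw [hgroup, if_pos rfl, pvGroup_eq_nil p _ hc, List.nil_append]

-- A's whole insertion loop builds the canonical grouping of the processed elements
theorem pvA_inv (es p : List (Int × Int × Int)) :
    es.foldl pvAddElem (pvCanon p) = pvCanon (p ++ es) := by
  induction es generalizing p with
  | nil => simp
  | cons e es ih =>
      rw [List.foldl_cons, pvStep, ih]
      simp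

theorem pvA_eq (Mat : List (List (Int × Int × Int))) :
    restructMatrix Mat = PySem.List.sorted (pvCanon Mat.flatten) pvHeadKey false := by
  unfold restructMatrix
  rw [← List.foldl_flatten]
  have h0 : ([] : List (List (Int × Int × Int))) = pvCanon [] := rfl
  rw [h0, pvA_inv, List.nil_append]

-- sorting whole groups by their head's column = listing groups by sorted distinct columns
theorem pvSK_pairwise (es : List (Int × Int × Int)) : (pvSK es).Pairwise (· < ·) := by
  have hnd : (pvKeys es).Nodup := by
    simp [pvKeys, PySem.List.dedup_eq_ofList, PySem.Set.nodup_ofList]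
  have hperm : (pvSK es).Perm (pvKeys es) := PySem.List.sorted_perm _ _ _
  have hle : (pvSK es).Pairwise (· ≤ ·) := by
    simpa using PySem.List.sorted_pairwise (pvKeys es) (fun k => k)
  have hnd' : (pvSK es).Nodup := hnd.perm hperm.symm
  exact (hle.and hnd').imp (fun h => lt_of_le_of_ne h.1 h.2)

theorem pvSort_map (es : List (Int × Int × Int)) :
    PySem.List.sorted (pvCanon es) pvHeadKey false = (pvSK es).map (pvGroup es) := by
  have hperm : (pvSK es).Perm (pvKeys es) := PySem.List.sorted_perm _ _ _
  apply PySem.List.sorted_eq_of_perm_of_pairwise_lt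
  · exact hperm.map (pvGroup es)
  · rw [List.pairwise_map]
    refine (pvSK_pairwise es).imp_of_mem ?_
    intro a b ha hb h
    rw [pvHeadKey_group es a ((PySem.List.mem_sorted _ _ _ _).mp ha),
        pvHeadKey_group es b ((PySem.List.mem_sorted _ _ _ _).mp hb)]
    exact h

-- ---- the stable sort of the flat list is the concatenation of the groups in key order ----

-- insertBy passes over elements it is not 'before' and stops at the first it is 'before'
theorem pvInsertBy_split {α : Type} (before : α → α → Bool) (x : α) (ys zs : List α)
    (hys : ∀ y ∈ ys, before x y = false) (hzs : ∀ z, zs.head? = some z → before x z = true) :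
    PySem.List.insertBy before x (ys ++ zs) = ys ++ x :: zs := by
  induction ys with
  | nil =>
      cases zs with
      | nil => simp [PySem.List.insertBy]
      | cons z t => simp [PySem.List.insertBy, hzs z rfl]
  | cons y ys ih =>
      have hy : before x y = false := hys y List.mem_cons_self
      simp only [List.cons_append, PySem.List.insertBy, hy]
      simp only [Bool.false_eq_true, if_false, List.cons.injEq, true_and]
      exact ih (fun y hy => hys y (List.mem_cons_of_mem _ hy))

-- key of a member of a block concatenation
theorem pvMem_blocks_key (p : List (Int × Int × Int)) (ks : List Int)
    (y : Int × Int × Int) (hy : y ∈ (ks.map (pvGroup p)).flatten) :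
    ∃ k ∈ ks, y.2.2 = k := by
  obtain ⟨b, hb, hyb⟩ := List.mem_flatten.mp hy
  obtain ⟨k, hk, rfl⟩ := List.mem_map.mp hb
  exact ⟨k, hk, by simpa using (List.mem_filter.mp hyb).2⟩

-- the elements dropped by takeWhile (< c) on a strictly increasing list without c are all > c
theorem pvDropWhile_gt (ks : List Int) (c : Int) (hpw : ks.Pairwise (· < ·)) (hc : c ∉ ks) :
    ∀ b ∈ ks.dropWhile (fun k => decide (k < c)), c < b := by
  induction ks with
  | nil => simp
  | cons k t ih =>
      intro b hb
      by_cases hk : k < c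
      · rw [List.dropWhile_cons_of_pos (by simpa using hk)] at hb
        exact ih hpw.of_cons (fun h => hc (List.mem_cons_of_mem _ h)) b hb
      · rw [List.dropWhile_cons_of_neg (by simpa using hk)] at hb
        have hkc : c < k := lt_of_le_of_ne (not_lt.mp hk) (fun h => hc (h ▸ List.mem_cons_self))
        rcases List.mem_cons.mp hb with rfl | hb
        · exact hkc
        · exact lt_trans hkc ((List.pairwise_cons.mp hpw).1 b hb)

-- stable sort by column = concatenation of the column groups in ascending column order
theorem pvSorted_flat (es : List (Int × Int × Int)) :
    PySem.List.sorted es (fun e => e.2.2) false = ((pvSK es).map (pvGroup es)).flatten := by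
  induction es using List.reverseRecOn with
  | nil => rfl
  | append_singleton p e ih =>
      have hfold : PySem.List.sorted (p ++ [e]) (fun x => x.2.2) false =
          PySem.List.insertBy (fun a b => decide (a.2.2 < b.2.2)) e
            (PySem.List.sorted p (fun x => x.2.2) false) := by
        rw [PySem.List.sorted_eq_foldl_insertBy, PySem.List.sorted_eq_foldl_insertBy,
          List.foldl_append, List.foldl_cons, List.foldl_nil]
      rw [hfold, ih]
      set c := e.2.2 with hc
      by_cases hmem : c ∈ pvKeys p
      · -- existing key: e is inserted at the end of its group
        have hcsk : c ∈ pvSK p := (PySem.List.mem_sorted _ _ _ _).mpr hmem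
        obtain ⟨s, t, hst⟩ := List.append_of_mem hcsk
        have hpw := pvSK_pairwise p
        rw [hst] at hpw
        have hcross := (List.pairwise_append.mp hpw).2.2
        have hs : ∀ a ∈ s, a < c := fun a ha => hcross a ha c List.mem_cons_self
        have ht : ∀ b ∈ t, c < b := fun b hb =>
          (List.pairwise_cons.mp (List.pairwise_append.mp hpw).2.1).1 b hb
        -- new sorted key list is unchanged
        have hskeq : pvSK (p ++ [e]) = pvSK p := by
          unfold pvSK; rw [pvKeys_append, if_pos hmem]
        rw [hskeq, hst]
        rw [List.map_append, List.map_cons, List.flatten_append, List.flatten_cons]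
        rw [show ((s.map (pvGroup p)).flatten ++ (pvGroup p c ++ (t.map (pvGroup p)).flatten))
              = ((s.map (pvGroup p)).flatten ++ pvGroup p c) ++ (t.map (pvGroup p)).flatten by
            simp [List.append_assoc]]
        rw [pvInsertBy_split]
        · -- identify with the groups of p ++ [e]
          rw [List.map_append, List.map_cons, List.flatten_append, List.flatten_cons]
          have hgs : ∀ u ∈ s, pvGroup (p ++ [e]) u = pvGroup p u := by
            intro u hu
            rw [pvGroup_append,
              if_neg (by intro h; have h1 := hs u hu; rw [← h] at h1; omega),
              List.append_nil]
          have hgt : ∀ u ∈ t, pvGroup (p ++ [e]) u = pvGroup p u := by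
            intro u hu
            rw [pvGroup_append,
              if_neg (by intro h; have h1 := ht u hu; rw [← h] at h1; omega),
              List.append_nil]
          rw [List.map_congr_left hgs, List.map_congr_left hgt]
          rw [pvGroup_append, if_pos rfl]
          simp [List.append_assoc]
        · -- everything before the insertion point has key ≤ c
          intro y hy
          rcases List.mem_append.mp hy with hy | hy
          · obtain ⟨k, hk, hyk⟩ := pvMem_blocks_key p s y hy
            have hlt := hs k hk
            simp [hyk]
            omega
          · have : y.2.2 = c := by simpa using (List.mem_filter.mp hy).2
            simp [this]
            omega
        · -- the first element after it has key > c
          intro z hz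
          have hzmem : z ∈ (t.map (pvGroup p)).flatten := List.mem_of_mem_head? hz
          obtain ⟨k, hk, hzk⟩ := pvMem_blocks_key p t z hzmem
          have hlt := ht k hk
          simp [hzk]
          omega
      · -- new key: e becomes a fresh singleton group between the smaller and larger keys
        have hpw := pvSK_pairwise p
        have hcsk : c ∉ pvSK p := fun h => hmem ((PySem.List.mem_sorted _ _ _ _).mp h)
        set s := (pvSK p).takeWhile (fun k => decide (k < c)) with hsdef
        set t := (pvSK p).dropWhile (fun k => decide (k < c)) with htdef
        have hst : pvSK p = s ++ t := (List.takeWhile_append_dropWhile).symm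
        have hs : ∀ a ∈ s, a < c := by
          intro a ha
          simpa using List.mem_takeWhile_imp ha
        have ht : ∀ b ∈ t, c < b := pvDropWhile_gt _ _ hpw hcsk
        -- the new sorted key list is s ++ c :: t
        have hskeq : pvSK (p ++ [e]) = s ++ c :: t := by
          apply PySem.List.sorted_eq_of_perm_of_pairwise_lt
          · rw [pvKeys_append, if_neg hmem]
            refine (List.perm_middle).trans (List.Perm.trans ?_ (List.perm_append_singleton c (pvKeys p)).symm)
            rw [← hst]
            exact (PySem.List.sorted_perm _ _ _).cons c
          · rw [hst] at hpw
            have hps := (List.pairwise_append.mp hpw).1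
            have hpt := (List.pairwise_append.mp hpw).2.1
            have hcross := (List.pairwise_append.mp hpw).2.2
            rw [List.pairwise_append]
            refine ⟨hps, List.pairwise_cons.mpr ⟨ht, hpt⟩, ?_⟩
            intro a ha b hb
            rcases List.mem_cons.mp hb with rfl | hb
            · exact hs a ha
            · exact hcross a ha b hb
        rw [hskeq, hst]
        rw [List.map_append, List.flatten_append]
        rw [pvInsertBy_split]
        · rw [List.map_append, List.map_cons, List.flatten_append, List.flatten_cons]
          have hgs : ∀ u ∈ s, pvGroup (p ++ [e]) u = pvGroup p u := by
            intro u hu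
            rw [pvGroup_append,
              if_neg (by intro h; have h1 := hs u hu; rw [← h] at h1; omega),
              List.append_nil]
          have hgt : ∀ u ∈ t, pvGroup (p ++ [e]) u = pvGroup p u := by
            intro u hu
            rw [pvGroup_append,
              if_neg (by intro h; have h1 := ht u hu; rw [← h] at h1; omega),
              List.append_nil]
          rw [List.map_congr_left hgs, List.map_congr_left hgt]
          rw [pvGroup_append, if_pos rfl, pvGroup_eq_nil p c hmem]
          simp
        · intro y hy
          obtain ⟨k, hk, hyk⟩ := pvMem_blocks_key p s y hy
          have hlt := hs k hk
          simp [hyk]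
          omega
        · intro z hz
          have hzmem : z ∈ (t.map (pvGroup p)).flatten := List.mem_of_mem_head? hz
          obtain ⟨k, hk, hzk⟩ := pvMem_blocks_key p t z hzmem
          have hlt := ht k hk
          simp [hzk]
          omega

-- ---- the run-splitting pass recovers the blocks ----

-- inside a block: no split happens while the keys agree with cur's head
theorem pvRun_within (b : List (Int × Int × Int)) (k : Int)
    (hb : ∀ e ∈ b, e.2.2 = k) :
    ∀ out cur, cur ≠ [] → pvHeadKey cur = k →
      b.foldl pvRunStep (out, cur) = (out, cur ++ b) := by
  induction b with
  | nil => intro out cur _ _; simp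
  | cons e b ih =>
      intro out cur hcur hkey
      have hek : e.2.2 = k := hb e List.mem_cons_self
      rw [List.foldl_cons]
      have hstep : pvRunStep (out, cur) e = (out, cur ++ [e]) := by
        rw [pvRunStep]
        simp [hkey, hek]
      rw [hstep, ih (fun x hx => hb x (List.mem_cons_of_mem _ hx)) out (cur ++ [e])
        (by simp) (by cases cur with
          | nil => exact absurd rfl hcur
          | cons x xs => simpa [pvHeadKey, PySem.List.pyGet?, PySem.List.pyIdx?] using hkey)]
      simp

-- over the whole block structure: every block comes out as one run
theorem pvRun_blocks (ks : List Int) (f : Int → List (Int × Int × Int))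
    (hne : ∀ k ∈ ks, f k ≠ []) (hkey : ∀ k ∈ ks, ∀ e ∈ f k, e.2.2 = k)
    (hpw : ks.Pairwise (· ≠ ·)) :
    ∀ out cur h, cur ≠ [] → pvHeadKey cur = h → (∀ k ∈ ks, h ≠ k) →
      (let st := ((ks.map f).flatten).foldl pvRunStep (out, cur)
       if st.2 ≠ [] then st.1 ++ [st.2] else st.1) = out ++ cur :: ks.map f := by
  induction ks with
  | nil =>
      intro out cur h hcur _ _
      simp [hcur]
  | cons k ks ih =>
      intro out cur h hcur hhead hdiff
      rcases hfk : f k with _ | ⟨e, b⟩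
      · exact absurd hfk (hne k List.mem_cons_self)
      have hek : e.2.2 = k := hkey k List.mem_cons_self e (by rw [hfk]; exact List.mem_cons_self)
      simp only [List.map_cons, List.flatten_cons, List.foldl_append, hfk, List.foldl_cons]
      have hstep : pvRunStep (out, cur) e = (out ++ [cur], [e]) := by
        rw [pvRunStep]
        have : pvHeadKey cur ≠ e.2.2 := by
          rw [hhead, hek]; exact hdiff k List.mem_cons_self
        simp [hcur, this]
      rw [hstep, pvRun_within b k
        (fun x hx => hkey k List.mem_cons_self x (by rw [hfk]; exact List.mem_cons_of_mem _ hx))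
        (out ++ [cur]) [e] (by simp) (by simpa [pvHeadKey, PySem.List.pyGet?, PySem.List.pyIdx?] using hek)]
      have := ih (fun u hu => hne u (List.mem_cons_of_mem _ hu))
        (fun u hu => hkey u (List.mem_cons_of_mem _ hu)) hpw.of_cons
        (out ++ [cur]) (e :: b) k (by simp)
        (by simpa [pvHeadKey, PySem.List.pyGet?, PySem.List.pyIdx?] using hek)
        (fun u hu => (List.pairwise_cons.mp hpw).1 u hu)
      simp only [List.singleton_append] at this ⊢
      rw [this, ← hfk]
      simp

-- B computes the groups in ascending column order
theorem pvB_eq (Mat : List (List (Int × Int × Int))) :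
    restructMatrix_alt Mat = (pvSK Mat.flatten).map (pvGroup Mat.flatten) := by
  unfold restructMatrix_alt
  dsimp only
  have hrow : ∀ (row : List (Int × Int × Int)) acc,
      row.foldl (fun acc e => acc ++ [e]) acc = acc ++ row := by
    intro row
    induction row with
    | nil => intro acc; simp
    | cons e r ih => intro acc; rw [List.foldl_cons, ih]; simp
  have hflat : ∀ (M : List (List (Int × Int × Int))) acc,
      M.foldl (fun acc row => row.foldl (fun acc e => acc ++ [e]) acc) acc = acc ++ M.flatten := by
    intro M
    induction M with
    | nil => intro acc; simp
    | cons r m ih => intro acc; rw [List.foldl_cons, hrow, ih]; simp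
  rw [hflat Mat [], List.nil_append, pvSorted_flat]
  rcases hsk : pvSK Mat.flatten with _ | ⟨k, ks⟩
  · rfl
  · have hmemsk : ∀ u, u ∈ pvSK Mat.flatten → u ∈ pvKeys Mat.flatten := by
      intro u hu; exact (PySem.List.mem_sorted _ _ _ _).mp hu
    have hne : ∀ u ∈ k :: ks, pvGroup Mat.flatten u ≠ [] := by
      intro u hu; exact pvGroup_ne_nil _ u (hmemsk u (hsk ▸ hu))
    have hkey : ∀ u ∈ k :: ks, ∀ e ∈ pvGroup Mat.flatten u, e.2.2 = u := by
      intro u _ e he; simpa using (List.mem_filter.mp he).2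
    have hpw : (k :: ks).Pairwise (· ≠ ·) :=
      hsk ▸ (pvSK_pairwise Mat.flatten).imp ne_of_lt
    rcases hfk : pvGroup Mat.flatten k with _ | ⟨e, b⟩
    · exact absurd hfk (hne k List.mem_cons_self)
    have hek : e.2.2 = k := hkey k List.mem_cons_self e (by rw [hfk]; exact List.mem_cons_self)
    simp only [List.map_cons, List.flatten_cons, List.foldl_append, hfk, List.foldl_cons]
    have hstep : pvRunStep ([], []) e = ([], [e]) := by rw [pvRunStep]; simp
    rw [hstep, pvRun_within b k
      (fun x hx => hkey k List.mem_cons_self x (by rw [hfk]; exact List.mem_cons_of_mem _ hx))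
      [] [e] (by simp) (by simpa [pvHeadKey, PySem.List.pyGet?, PySem.List.pyIdx?] using hek)]
    have := pvRun_blocks ks (pvGroup Mat.flatten)
      (fun u hu => hne u (List.mem_cons_of_mem _ hu))
      (fun u hu => hkey u (List.mem_cons_of_mem _ hu)) hpw.of_cons
      [] (e :: b) k (by simp)
      (by simpa [pvHeadKey, PySem.List.pyGet?, PySem.List.pyIdx?] using hek)
      (fun u hu => (List.pairwise_cons.mp hpw).1 u hu)
    simp only [List.singleton_append, List.nil_append] at this ⊢
    rw [this, ← hfk]

-- ===== VERDICT (by name: the statement is the Claim_ definition above) =====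
theorem restructMatrix_spec : Claim_equal_restructMatrix := by
  intro Mat _
  show restructMatrix Mat = restructMatrix_alt Mat
  rw [pvA_eq, pvB_eq, pvSort_map]
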